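-- pv_equiv track=rewrite | github.com/ishine/common_tools | ali-convert-tool/convert_phones.py | SplitPhonesAli
-- ===== SOURCE A (Python) =====
-- def SplitPhonesAli(ph_ali, shengmu_dict):
--     words_list = []
--     word = [ph_ali[0]]
--     for ph in ph_ali[1:]:
--         if ph in shengmu_dict.keys() and ph != word[-1]:
--             words_list.append(word)
--             word=[ph]
--         else:
--             word.append(ph)
--     if len(word) != 0:
--         words_list.append(word)
--     return words_list
-- ===== SOURCE B (Python) =====
-- def SplitPhonesAli(ph_ali, shengmu_dict):
--     if not ph_ali:
--         return []
--     n = len(ph_ali)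
--     cuts = [i for i in range(1, n)
--             if ph_ali[i] in shengmu_dict and ph_ali[i] != ph_ali[i - 1]]
--     bounds = [0] + cuts + [n]
--     return [ph_ali[a:b] for a, b in zip(bounds, bounds[1:])]
-- ===== Notes on version B (the rewrite author's own statement) =====
-- stated objective: alternative
-- what changed: A builds words in one stateful pass (current-word accumulator flushed at each boundary); B makes two passes: it first collects the cut positions where a shengmu-dict phone differs from its predecessor, then slices the list into the segments between consecutive bounds.
import Mathlib
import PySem

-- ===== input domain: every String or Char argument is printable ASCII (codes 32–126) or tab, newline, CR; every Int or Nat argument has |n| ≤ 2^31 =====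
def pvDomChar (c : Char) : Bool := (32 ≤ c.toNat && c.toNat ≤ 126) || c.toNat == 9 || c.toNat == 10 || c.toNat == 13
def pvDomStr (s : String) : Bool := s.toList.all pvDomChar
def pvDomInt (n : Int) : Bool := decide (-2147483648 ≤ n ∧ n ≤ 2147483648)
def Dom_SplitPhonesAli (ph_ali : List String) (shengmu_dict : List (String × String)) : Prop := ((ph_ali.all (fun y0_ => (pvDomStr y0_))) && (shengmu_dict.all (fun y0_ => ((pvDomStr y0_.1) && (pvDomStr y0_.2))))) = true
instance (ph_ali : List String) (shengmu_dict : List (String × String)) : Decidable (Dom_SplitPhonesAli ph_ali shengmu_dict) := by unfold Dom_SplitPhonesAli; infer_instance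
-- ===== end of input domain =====

-- B replaces A's stateful accumulator loop by two passes: collect the cut positions, then slice the
-- list into segments (objective: alternative decomposition, same cost).

-- ===== PORT A =====
def SplitPhonesAli (ph_ali : List String) (shengmu_dict : List (String × String)) : List (List String) :=
  match ph_ali with
  | [] => []   -- Python raises IndexError on ph_ali[0] here; excluded by Pre_
  | p0 :: rest =>
    let st := rest.foldl (fun (st : List (List String) × List String) ph =>
      if (shengmu_dict.map Prod.fst).contains ph && ph != st.2.getLastD "" then
        (st.1 ++ [st.2], [ph])
      else
        (st.1, st.2 ++ [ph])) ([], [p0])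
    if st.2.length ≠ 0 then st.1 ++ [st.2] else st.1

-- ===== PORT B =====
def SplitPhonesAli_alt (ph_ali : List String) (shengmu_dict : List (String × String)) : List (List String) :=
  if ph_ali = [] then []
  else
    let n : Int := ph_ali.length
    let cuts : List Int := (PySem.List.pyRange 1 n 1).filter (fun i =>
      (shengmu_dict.map Prod.fst).contains (PySem.List.pyGetD ph_ali i "") &&
      PySem.List.pyGetD ph_ali i "" != PySem.List.pyGetD ph_ali (i - 1) "")
    let bounds : List Int := 0 :: cuts ++ [n]
    (bounds.zip bounds.tail).map (fun ab => PySem.List.slice ph_ali (some ab.1) (some ab.2))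

-- ===== PRECONDITION & SPEC =====
-- Pre_ excludes only the empty list, on which Python A raises IndexError (ph_ali[0]).
def Pre_SplitPhonesAli (ph_ali : List String) (shengmu_dict : List (String × String)) : Prop :=
  ph_ali ≠ []
instance (ph_ali : List String) (shengmu_dict : List (String × String)) : Decidable (Pre_SplitPhonesAli ph_ali shengmu_dict) := by unfold Pre_SplitPhonesAli; infer_instance

def pvWitness_SplitPhonesAli : List String × (List (String × String)) :=
  (["b", "a", "a", "b", "b"], [("b", "x")])

def Spec_SplitPhonesAli (ph_ali : List String) (shengmu_dict : List (String × String)) (out : List (List String)) : Prop := out = SplitPhonesAli_alt ph_ali shengmu_dict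
instance (ph_ali : List String) (shengmu_dict : List (String × String)) (out : List (List String)) : Decidable (Spec_SplitPhonesAli ph_ali shengmu_dict out) := by unfold Spec_SplitPhonesAli; infer_instance

-- ===== CLAIM (what is proved, stated in full; the proofs are below) =====
def Claim_equal_SplitPhonesAli : Prop := ∀ (ph_ali : List String) (shengmu_dict : List (String × String)), Dom_SplitPhonesAli ph_ali shengmu_dict → Pre_SplitPhonesAli ph_ali shengmu_dict → Spec_SplitPhonesAli ph_ali shengmu_dict (SplitPhonesAli ph_ali shengmu_dict)

-- ===== LEMMAS AND PROOFS =====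

-- Common recursive characterisation: given the cut test c and the phone p ending the current word,
-- splitAdj c p rest returns the phones extending that word and the completed words after it.
def splitAdj (c : String → String → Bool) : String → List String → List String × List (List String)
  | _, [] => ([], [])
  | p, q :: rest =>
    let r := splitAdj c q rest
    if c q p then ([], (q :: r.1) :: r.2) else (q :: r.1, r.2)

def cutOf (d : List (String × String)) (q p : String) : Bool :=
  (d.map Prod.fst).contains q && q != p

-- Nat-level reformulation of port B's cut positions and slicing
def cutsN (c : String → String → Bool) (l : List String) : List Nat :=
  (List.range' 1 (l.length - 1)).filter (fun i => c (l.getD i "") (l.getD (i - 1) ""))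

def segsOf (l : List String) (bs : List Nat) : List (List String) :=
  (bs.zip bs.tail).map (fun p => (l.drop p.1).take (p.2 - p.1))

def segsN (c : String → String → Bool) (l : List String) : List (List String) :=
  segsOf l (0 :: cutsN c l ++ [l.length])

theorem foldA_splitAdj (d : List (String × String)) :
    ∀ (rest : List String) (acc : List (List String)) (w : List String), w ≠ [] →
      (let st := rest.foldl (fun (st : List (List String) × List String) ph =>
          if (d.map Prod.fst).contains ph && ph != st.2.getLastD "" then
            (st.1 ++ [st.2], [ph])
          else
            (st.1, st.2 ++ [ph])) (acc, w)
       if st.2.length ≠ 0 then st.1 ++ [st.2] else st.1)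
      = acc ++ ((w ++ (splitAdj (cutOf d) (w.getLastD "") rest).1)
                  :: (splitAdj (cutOf d) (w.getLastD "") rest).2) := by
  intro rest
  induction rest with
  | nil =>
    intro acc w hw
    rw [List.foldl_nil]
    rw [if_pos (by simpa using hw)]
    simp [splitAdj]
  | cons ph rest ih =>
    intro acc w hw
    have hstep : (rest.foldl (fun (st : List (List String) × List String) ph =>
          if (d.map Prod.fst).contains ph && ph != st.2.getLastD "" then
            (st.1 ++ [st.2], [ph])
          else
            (st.1, st.2 ++ [ph]))
          (if cutOf d ph (w.getLastD "") then (acc ++ [w], [ph]) else (acc, w ++ [ph])))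
        = ((ph :: rest).foldl (fun (st : List (List String) × List String) ph =>
          if (d.map Prod.fst).contains ph && ph != st.2.getLastD "" then
            (st.1 ++ [st.2], [ph])
          else
            (st.1, st.2 ++ [ph])) (acc, w)) := by
      rw [List.foldl_cons]; rfl
    rw [← hstep]
    simp only [splitAdj]
    by_cases hc : cutOf d ph (w.getLastD "") = true
    · rw [if_pos hc, if_pos hc, ih (acc ++ [w]) [ph] (by simp)]
      show acc ++ [w] ++ _ = _
      simp [List.getLastD]
    · rw [if_neg hc, if_neg hc, ih acc (w ++ [ph]) (by simp)]
      rw [List.getLastD_concat]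
      simp

theorem portB_segsN (ph_ali : List String) (d : List (String × String)) (h : ph_ali ≠ []) :
    SplitPhonesAli_alt ph_ali d = segsN (cutOf d) ph_ali := by
  unfold SplitPhonesAli_alt segsN segsOf
  rw [if_neg h]
  dsimp only
  have h1 : ∀ k : Nat, ((1 : Int) + (k : Int)) = ((1 + k : Nat) : Int) := by
    intro k; omega
  have hcuts : (PySem.List.pyRange 1 (ph_ali.length : Int) 1).filter (fun i =>
      (d.map Prod.fst).contains (PySem.List.pyGetD ph_ali i "") &&
      PySem.List.pyGetD ph_ali i "" != PySem.List.pyGetD ph_ali (i - 1) "")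
      = ((List.range (ph_ali.length - 1)).filter
          (fun k => cutOf d (ph_ali.getD (1 + k) "") (ph_ali.getD k ""))).map
          (fun k => ((1 + k : Nat) : Int)) := by
    rw [PySem.List.pyRange_one, List.filter_map]
    have hfun : ((fun i =>
            (List.map Prod.fst d).contains (PySem.List.pyGetD ph_ali i "") &&
              PySem.List.pyGetD ph_ali i "" != PySem.List.pyGetD ph_ali (i - 1) "") ∘
          fun k : Nat => (1 : Int) + ↑k)
        = fun k : Nat => cutOf d (ph_ali.getD (1 + k) "") (ph_ali.getD k "") := by
      funext k
      have h2 : ((1 : Int) + (k : Int)) - 1 = ((k : Nat) : Int) := by push_cast; ring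
      simp only [Function.comp]
      rw [h2, h1 k]
      simp only [PySem.List.pyGetD_natCast, cutOf]
    rw [hfun]
    have hn : ((ph_ali.length : Int) - 1).toNat = ph_ali.length - 1 := by omega
    rw [hn]
    exact List.map_congr_left (fun k _ => h1 k)
  rw [hcuts]
  -- bounds as a mapped Nat list
  have hb : (0 : Int) :: ((List.range (ph_ali.length - 1)).filter
          (fun k => cutOf d (ph_ali.getD (1 + k) "") (ph_ali.getD k ""))).map
          (fun k => ((1 + k : Nat) : Int)) ++ [(ph_ali.length : Int)]
      = ((0 :: ((List.range (ph_ali.length - 1)).filter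
          (fun k => cutOf d (ph_ali.getD (1 + k) "") (ph_ali.getD k ""))).map (fun k => 1 + k)
          ++ [ph_ali.length]).map (fun i : Nat => (i : Int))) := by
    simp [List.map_map, Function.comp]
  rw [hb]
  -- cutsN equals the mapped filter
  have hcn : cutsN (cutOf d) ph_ali
      = ((List.range (ph_ali.length - 1)).filter
          (fun k => cutOf d (ph_ali.getD (1 + k) "") (ph_ali.getD k ""))).map (fun k => 1 + k) := by
    unfold cutsN
    rw [List.range'_eq_map_range, List.filter_map]
    congr 1
    apply List.filter_congr
    intro k _
    simp only [Function.comp]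
    rw [show 1 + k - 1 = k from by omega]
  rw [← hcn]
  -- zip of mapped bounds
  generalize (0 :: cutsN (cutOf d) ph_ali ++ [ph_ali.length]) = bs
  rw [show (bs.map (fun i : Nat => (i : Int))).tail = bs.tail.map (fun i : Nat => (i : Int)) from
    List.map_tail.symm]
  rw [List.zip_map, List.map_map]
  apply List.map_congr_left
  intro p _
  simp [Function.comp, PySem.List.slice_natCast]

theorem cutsN_cons_cons (c : String → String → Bool) (x y : String) (t : List String) :
    cutsN c (x :: y :: t)
      = (if c y x then [1] else []) ++ (cutsN c (y :: t)).map (· + 1) := by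
  unfold cutsN
  have hlen : (x :: y :: t).length - 1 = t.length + 1 := by simp
  rw [hlen, List.range'_succ, List.filter_cons]
  have hr2 : List.range' 2 t.length = (List.range' 1 t.length).map (· + 1) := by
    rw [List.range'_eq_map_range, List.range'_eq_map_range, List.map_map]
    exact List.map_congr_left (fun k _ => by simp [Function.comp]; omega)
  rw [hr2, List.filter_map]
  have hfilt : List.filter ((fun i => c ((x :: y :: t).getD i "") ((x :: y :: t).getD (i - 1) "")) ∘
        (· + 1)) (List.range' 1 t.length)
      = List.filter (fun i => c ((y :: t).getD i "") ((y :: t).getD (i - 1) "")) (List.range' 1 t.length) := by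
    apply List.filter_congr
    intro j hj
    have h1 : 1 ≤ j := (List.mem_range'_1.mp hj).1
    obtain ⟨j', rfl⟩ := Nat.exists_eq_add_of_le h1
    simp only [Function.comp]
    rw [show 1 + j' + 1 - 1 = j' + 1 from by omega, show 1 + j' = j' + 1 from by omega]
    simp
  rw [hfilt]
  have hlen2 : (y :: t).length - 1 = t.length := by simp
  rw [hlen2]
  by_cases hc : c y x
  · simp only [List.getD]
    simp [hc]
  · simp only [List.getD]
    simp [hc]

theorem segsOf_shift (x : String) (l : List String) (bs : List Nat) :
    segsOf (x :: l) (bs.map (· + 1)) = segsOf l bs := by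
  unfold segsOf
  rw [show (bs.map (· + 1)).tail = bs.tail.map (· + 1) from List.map_tail.symm]
  rw [List.zip_map, List.map_map]
  apply List.map_congr_left
  intro p _
  simp [Function.comp, Nat.add_sub_add_right]

theorem segsOf_cons_cons (l : List String) (a b : Nat) (ms : List Nat) :
    segsOf l (a :: b :: ms) = ((l.drop a).take (b - a)) :: segsOf l (b :: ms) := by
  simp [segsOf]

theorem segsOf_zero_shift (x : String) (l : List String) (m : Nat) (ms : List Nat) :
    segsOf (x :: l) (0 :: (m :: ms).map (· + 1))
      = (x :: ((l.take m) :: segsOf l (m :: ms)).headD [])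
          :: ((l.take m) :: segsOf l (m :: ms)).tail := by
  simp only [List.map_cons]
  rw [segsOf_cons_cons]
  rw [show (m + 1) :: ms.map (· + 1) = (m :: ms).map (· + 1) from by simp]
  rw [segsOf_shift]
  simp

theorem segsN_splitAdj (c : String → String → Bool) :
    ∀ (xs : List String) (x : String),
      segsN c (x :: xs) = (x :: (splitAdj c x xs).1) :: (splitAdj c x xs).2 := by
  intro xs
  induction xs with
  | nil =>
    intro x
    simp [segsN, segsOf, cutsN, splitAdj]
  | cons y t ih =>
    intro x
    unfold segsN
    rw [cutsN_cons_cons]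
    simp only [splitAdj]
    by_cases hc : c y x
    · rw [if_pos hc, if_pos hc]
      have hbs : (0 : Nat) :: ([1] ++ (cutsN c (y :: t)).map (· + 1)) ++ [(x :: y :: t).length]
          = 0 :: 1 :: ((cutsN c (y :: t) ++ [(y :: t).length]).map (· + 1)) := by
        simp
      rw [hbs, segsOf_cons_cons]
      have h1 : (1 : Nat) :: ((cutsN c (y :: t) ++ [(y :: t).length]).map (· + 1))
          = (0 :: cutsN c (y :: t) ++ [(y :: t).length]).map (· + 1) := by simp
      rw [h1, segsOf_shift]
      have := ih y
      unfold segsN at this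
      rw [this]
      simp
    · rw [if_neg hc, if_neg hc]
      obtain ⟨b0, ms0, hms⟩ : ∃ b0 ms0,
          cutsN c (y :: t) ++ [(y :: t).length] = b0 :: ms0 := by
        cases cutsN c (y :: t) <;> exact ⟨_, _, rfl⟩
      have hbs : (0 : Nat) :: ([] ++ (cutsN c (y :: t)).map (· + 1)) ++ [(x :: y :: t).length]
          = 0 :: ((b0 :: ms0).map (· + 1)) := by
        rw [← hms]; simp
      rw [hbs, segsOf_zero_shift]
      have hIH := ih y
      unfold segsN at hIH
      have hIH2 : ((y :: t).take b0) :: segsOf (y :: t) (b0 :: ms0)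
          = (y :: (splitAdj c y t).1) :: (splitAdj c y t).2 := by
        have h3 : segsOf (y :: t) (0 :: (b0 :: ms0))
            = (y :: (splitAdj c y t).1) :: (splitAdj c y t).2 := by
          rw [← hms]; exact hIH
        rw [segsOf_cons_cons] at h3
        simpa using h3
      rw [hIH2]
      simp

-- ===== VERDICT (by name: the statement is the Claim_ definition above) =====
theorem SplitPhonesAli_spec : Claim_equal_SplitPhonesAli := by
  intro ph_ali d _ hpre
  unfold Spec_SplitPhonesAli
  match ph_ali with
  | [] => exact absurd rfl hpre
  | p0 :: rest =>
    rw [portB_segsN _ _ (by simp), segsN_splitAdj]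
    show (let st := rest.foldl _ ([], [p0]);
          if st.2.length ≠ 0 then st.1 ++ [st.2] else st.1) = _
    rw [foldA_splitAdj d rest [] [p0] (by simp)]
    simp [List.getLastD]
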